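-- pv_equiv track=rewrite | github.com/EneaDim/picobot | picobot/tools/podcast.py | _enforce_word_cap
-- ===== SOURCE A (Python) =====
-- def _enforce_word_cap(parts: list[tuple[str, str]], hard_cap_words: int) -> list[tuple[str, str]]:
--     cap = max(80, int(hard_cap_words or 0))
--     if cap <= 0:
--         return parts
--     out: list[tuple[str, str]] = []
--     used = 0
--     for spk, txt in parts:
--         words = (txt or "").split()
--         if not words:
--             continue
--         remaining = cap - used
--         if remaining <= 0:
--             break
--         if len(words) > remaining:
--             words = words[:remaining]
--         out.append((spk, " ".join(words)))
--         used += len(words)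
--     return out
-- ===== SOURCE B (Python) =====
-- def _enforce_word_cap(parts: list[tuple[str, str]], hard_cap_words: int) -> list[tuple[str, str]]:
--     cap = max(80, int(hard_cap_words or 0))
--     if cap <= 0:
--         return parts
--     chunks = [(spk, w) for spk, w in ((spk, (txt or "").split()) for spk, txt in parts) if w]
--     counts = [len(w) for _, w in chunks]
--     total = 0
--     cut = len(chunks)
--     for i, c in enumerate(counts):
--         if total + c >= cap:
--             cut = i
--             break
--         total += c
--     out = [(spk, " ".join(w)) for spk, w in chunks[:cut]]
--     if cut < len(chunks):
--         spk, w = chunks[cut]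
--         out.append((spk, " ".join(w[: cap - total])))
--     return out
-- ===== Notes on version B (the rewrite author's own statement) =====
-- stated objective: alternative
-- what changed: Replaces A's single greedy loop with mutable used/break/continue state by a pipeline: precompute non-empty word lists, scan a prefix-sum of word counts to locate the cutoff part, then emit the full parts before the cutoff and one sliced boundary part.
import Mathlib
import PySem

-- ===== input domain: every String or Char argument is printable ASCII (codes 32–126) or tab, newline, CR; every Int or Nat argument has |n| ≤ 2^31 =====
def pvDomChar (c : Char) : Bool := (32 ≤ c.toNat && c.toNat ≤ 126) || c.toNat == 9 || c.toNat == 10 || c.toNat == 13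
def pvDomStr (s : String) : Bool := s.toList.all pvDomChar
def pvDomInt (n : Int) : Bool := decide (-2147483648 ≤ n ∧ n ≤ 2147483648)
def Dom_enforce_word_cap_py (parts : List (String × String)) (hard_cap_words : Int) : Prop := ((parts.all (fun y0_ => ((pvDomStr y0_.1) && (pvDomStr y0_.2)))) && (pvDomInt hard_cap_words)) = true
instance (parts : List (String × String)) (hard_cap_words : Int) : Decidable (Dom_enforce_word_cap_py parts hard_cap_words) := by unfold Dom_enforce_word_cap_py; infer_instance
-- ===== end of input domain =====

-- B replaces A's greedy loop (mutable used / continue / break) by a pipeline: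
-- non-empty word lists, a prefix-sum scan locating the cutoff part, then full
-- parts before the cutoff plus one sliced boundary part. Objective: alternative.

-- ===== PORT A =====
-- the for-loop of A with its `used` accumulator; `continue` = recurse, `break` = stop
def ewcLoopA (cap : Int) : List (String × String) → Int → List (String × String)
  | [], _ => []
  | (spk, txt) :: rest, used =>
    let words := PySem.Str.split₀ txt   -- (txt or "").split(): split₀ "" = []
    if words = [] then ewcLoopA cap rest used
    else
      let remaining := cap - used
      if remaining ≤ 0 then []
      else
        let words := if (words.length : Int) > remaining
          then PySem.List.slice words none (some remaining)   -- words[:remaining]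
          else words
        (spk, PySem.Str.join " " words) :: ewcLoopA cap rest (used + words.length)

def enforce_word_cap_py (parts : List (String × String)) (hard_cap_words : Int) : List (String × String) :=
  let cap := max 80 (if hard_cap_words = 0 then 0 else hard_cap_words)  -- max(80, int(hard_cap_words or 0))
  if cap ≤ 0 then parts
  else ewcLoopA cap parts 0

-- ===== PORT B =====
-- the prefix-sum scan of Source B: returns (cut, total-before-cut)
def ewcFindCut (cap : Int) : List Int → Int → Nat → Nat × Int
  | [], total, i => (i, total)
  | c :: rest, total, i => if total + c ≥ cap then (i, total) else ewcFindCut cap rest (total + c) (i + 1)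

def enforce_word_cap_py_alt (parts : List (String × String)) (hard_cap_words : Int) : List (String × String) :=
  let cap := max 80 (if hard_cap_words = 0 then 0 else hard_cap_words)
  if cap ≤ 0 then parts
  else
    let chunks := (parts.map (fun p => (p.1, PySem.Str.split₀ p.2))).filter (fun c => !c.2.isEmpty)
    let counts := chunks.map (fun c => (c.2.length : Int))
    let ct := ewcFindCut cap counts 0 0
    let out := (chunks.take ct.1).map (fun c => (c.1, PySem.Str.join " " c.2))
    if ct.1 < chunks.length then
      out ++ [((chunks.getD ct.1 ("", [])).1, PySem.Str.join " " (PySem.List.slice (chunks.getD ct.1 ("", [])).2 none (some (cap - ct.2))))]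
    else out

-- ===== PRECONDITION & SPEC =====
def Spec_enforce_word_cap_py (parts : List (String × String)) (hard_cap_words : Int) (out : List (String × String)) : Prop := out = enforce_word_cap_py_alt parts hard_cap_words
instance (parts : List (String × String)) (hard_cap_words : Int) (out : List (String × String)) : Decidable (Spec_enforce_word_cap_py parts hard_cap_words out) := by unfold Spec_enforce_word_cap_py; infer_instance

-- ===== CLAIM (what is proved, stated in full; the proofs are below) =====
def Claim_equal_enforce_word_cap_py : Prop := ∀ (parts : List (String × String)) (hard_cap_words : Int), Dom_enforce_word_cap_py parts hard_cap_words → Spec_enforce_word_cap_py parts hard_cap_words (enforce_word_cap_py parts hard_cap_words)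

-- ===== LEMMAS AND PROOFS =====

-- a common reference form: emit whole chunks until the one that reaches the cap, slice it
def ewcRef (cap : Int) : List (String × List String) → Int → List (String × String)
  | [], _ => []
  | (spk, ws) :: rest, total =>
    if cap ≤ total + ws.length then
      [(spk, PySem.Str.join " " (PySem.List.slice ws none (some (cap - total))))]
    else (spk, PySem.Str.join " " ws) :: ewcRef cap rest (total + ws.length)

-- once used has reached cap, A's loop emits nothing (continue on empties, then break)
theorem ewcLoopA_done (cap : Int) (ps : List (String × String)) (used : Int) (h : cap ≤ used) :
    ewcLoopA cap ps used = [] := by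
  induction ps generalizing used with
  | nil => simp [ewcLoopA]
  | cons p rest ih =>
    obtain ⟨s, t⟩ := p
    simp only [ewcLoopA]
    split_ifs with h1 h2
    · exact ih used h
    · rfl
    · omega

-- index shift for the prefix-sum scan
theorem ewcFindCut_shift (cap : Int) (cs : List Int) (t : Int) (i : Nat) :
    ewcFindCut cap cs t i = ((ewcFindCut cap cs t 0).1 + i, (ewcFindCut cap cs t 0).2) := by
  induction cs generalizing t i with
  | nil => simp [ewcFindCut]
  | cons c rest ih =>
    simp only [ewcFindCut]
    split_ifs
    · simp
    · rw [ih (t + c) (i + 1), ih (t + c) (0 + 1)]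
      simp only [Prod.mk.injEq]
      exact ⟨by omega, trivial⟩

-- B's cut-and-assemble equals the reference form
theorem B_eq_ref (cap : Int) (chunks : List (String × List String)) (total : Int) :
    (let ct := ewcFindCut cap (chunks.map (fun c => (c.2.length : Int))) total 0
     let out := (chunks.take ct.1).map (fun c => (c.1, PySem.Str.join " " c.2))
     if ct.1 < chunks.length then
       out ++ [((chunks.getD ct.1 ("", [])).1, PySem.Str.join " " (PySem.List.slice (chunks.getD ct.1 ("", [])).2 none (some (cap - ct.2))))]
     else out) = ewcRef cap chunks total := by
  induction chunks generalizing total with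
  | nil => simp [ewcFindCut, ewcRef]
  | cons hd rest ih =>
    obtain ⟨spk, ws⟩ := hd
    simp only [List.map_cons, ewcFindCut, ewcRef]
    by_cases hge : total + (ws.length : Int) ≥ cap
    · rw [if_pos hge, if_pos (show cap ≤ total + (ws.length : Int) from hge)]
      simp
    · rw [if_neg hge, if_neg (show ¬ cap ≤ total + (ws.length : Int) from hge)]
      rw [ewcFindCut_shift cap _ (total + ws.length) (0 + 1)]
      have ih' := ih (total + (ws.length : Int))
      set F := ewcFindCut cap (rest.map (fun c => (c.2.length : Int))) (total + ws.length) 0 with hF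
      simp only at ih' ⊢
      by_cases h : F.1 < rest.length
      · rw [if_pos (show F.1 + (0 + 1) < ((spk, ws) :: rest).length by simp; omega)]
        rw [if_pos h] at ih'
        simp only [show F.1 + (0 + 1) = F.1 + 1 from rfl, List.take_succ_cons, List.map_cons,
          List.getD_cons_succ]
        rw [← ih']
        rfl
      · rw [if_neg (show ¬ F.1 + (0 + 1) < ((spk, ws) :: rest).length by simp; omega)]
        rw [if_neg h] at ih'
        simp only [show F.1 + (0 + 1) = F.1 + 1 from rfl, List.take_succ_cons, List.map_cons]
        rw [← ih']

-- A's loop on the raw parts equals the reference form on the filtered chunks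
theorem A_eq_ref (cap : Int) (parts : List (String × String)) (used : Int) (hu : used < cap) :
    ewcLoopA cap parts used
      = ewcRef cap ((parts.map (fun p => (p.1, PySem.Str.split₀ p.2))).filter (fun c => !c.2.isEmpty)) used := by
  induction parts generalizing used with
  | nil => simp [ewcLoopA, ewcRef]
  | cons hd rest ih =>
    obtain ⟨spk, txt⟩ := hd
    simp only [ewcLoopA, List.map_cons, List.filter_cons]
    by_cases hempty : PySem.Str.split₀ txt = []
    · simp [hempty, ih used hu]
    · rw [if_neg hempty, if_neg (by omega : ¬ cap - used ≤ 0),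
          if_pos (show (!(PySem.Str.split₀ txt).isEmpty) = true by simp [hempty])]
      simp only [ewcRef]
      set ws := PySem.Str.split₀ txt with hws
      by_cases hbig : (ws.length : Int) > cap - used
      · rw [if_pos hbig, if_pos (show cap ≤ used + (ws.length : Int) by omega)]
        have hlen : ((PySem.List.slice ws none (some (cap - used))).length : Int) = cap - used := by
          rw [PySem.List.slice_to ws (by omega)]
          simp [List.length_take]; omega
        rw [ewcLoopA_done cap rest _ (by omega)]
      · rw [if_neg hbig]
        by_cases heq : (ws.length : Int) = cap - used
        · rw [if_pos (show cap ≤ used + (ws.length : Int) by omega)]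
          rw [PySem.List.slice_to ws (by omega), List.take_of_length_le (by omega)]
          rw [ewcLoopA_done cap rest _ (by omega)]
        · rw [if_neg (show ¬ cap ≤ used + (ws.length : Int) by omega)]
          exact congrArg _ (ih (used + ws.length) (by omega))

-- ===== VERDICT (by name: the statement is the Claim_ definition above) =====
theorem enforce_word_cap_py_spec : Claim_equal_enforce_word_cap_py := by
  intro parts hcw _
  unfold Spec_enforce_word_cap_py enforce_word_cap_py enforce_word_cap_py_alt
  set cap := max 80 (if hcw = 0 then 0 else hcw) with hcap
  have hpos : ¬ cap ≤ 0 := by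
    have : (80 : Int) ≤ cap := le_max_left _ _
    omega
  simp only [if_neg hpos]
  rw [A_eq_ref cap parts 0 (by omega), ← B_eq_ref cap _ 0]
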